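-- pv_equiv track=rewrite | github.com/ikokkari/PythonProblems | labs109.py | bridge_score
-- ===== SOURCE A (Python) =====
-- def bridge_score(strain, level, vul, doubled, made):
--     mul = {'X': 2, 'XX': 4}.get(doubled, 1)
--     score, bonus = 0, 0
--
--     # Add up the values of individual tricks.
--     for trick in range(1, made+1):
--         # Raw points for this trick.
--         if strain == 'clubs' or strain == 'diamonds':
--             pts = 20
--         elif strain == 'hearts' or strain == 'spades':
--             pts = 30
--         else:
--             pts = 40 if trick == 1 else 30
--         # Score from the raw points.
--         if trick <= level:  # Part of contract
--             score += mul * pts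
--         elif mul == 1:  # Undoubled overtrick
--             bonus += mul * pts
--         elif mul == 2:  # Doubled overtrick
--             bonus += 200 if vul else 100
--         else:  # Redoubled overtrick
--             bonus += 400 if vul else 200
--     if score >= 100:  # Game bonus
--         bonus += 500 if vul else 300
--     else:  # Partscore bonus
--         bonus += 50
--     if level == 6:  # Small slam bonus
--         bonus += 750 if vul else 500
--     if level == 7:  # Grand slam bonus
--         bonus += 1500 if vul else 1000
--     score += bonus
--     if mul == 2:  # Insult bonus for making a (re)doubled contract
--         score += 50
--     elif mul == 4:
--         score += 100
--     return score
-- ===== SOURCE B (Python) =====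
-- def bridge_score(strain, level, vul, doubled, made):
--     mul = 2 if doubled == 'X' else 4 if doubled == 'XX' else 1
--     c = min(made, level)          # contracted tricks taken
--     o = made - c                  # overtricks
--     if strain in ('clubs', 'diamonds'):
--         trick_points, over = 20 * c, 20 * o
--     elif strain in ('hearts', 'spades'):
--         trick_points, over = 30 * c, 30 * o
--     else:  # notrump: 40 for the first trick, 30 for each later one
--         trick_points, over = (40 + 30 * (c - 1) if c else 0), 30 * o
--     score = mul * trick_points
--     if mul == 1:
--         bonus = over
--     elif mul == 2:
--         bonus = (200 if vul else 100) * o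
--     else:
--         bonus = (400 if vul else 200) * o
--     bonus += (500 if vul else 300) if score >= 100 else 50
--     if level == 6:
--         bonus += 750 if vul else 500
--     elif level == 7:
--         bonus += 1500 if vul else 1000
--     insult = 50 if mul == 2 else 100 if mul == 4 else 0
--     return score + bonus + insult
-- ===== Notes on version B (the rewrite author's own statement) =====
-- stated objective: faster
-- what changed: Replaces the per-trick loop with a closed form over the contract-trick count c=min(made,level) and overtrick count o=made-c; Pre_ restricts to the natural bridge domain (level >= 1, made >= 0), outside which A's loop-derived values (a 40-point first 'overtrick' at notrump with level <= 0, a flat 50 for negative made) are implementation accidents.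
-- outside the precondition, e.g. on bridge_score('notrump', 0, False, '', 1): A returns 90, B returns 80; on bridge_score('clubs', 3, False, '', -2): A returns 50, B returns 10
import Mathlib
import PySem

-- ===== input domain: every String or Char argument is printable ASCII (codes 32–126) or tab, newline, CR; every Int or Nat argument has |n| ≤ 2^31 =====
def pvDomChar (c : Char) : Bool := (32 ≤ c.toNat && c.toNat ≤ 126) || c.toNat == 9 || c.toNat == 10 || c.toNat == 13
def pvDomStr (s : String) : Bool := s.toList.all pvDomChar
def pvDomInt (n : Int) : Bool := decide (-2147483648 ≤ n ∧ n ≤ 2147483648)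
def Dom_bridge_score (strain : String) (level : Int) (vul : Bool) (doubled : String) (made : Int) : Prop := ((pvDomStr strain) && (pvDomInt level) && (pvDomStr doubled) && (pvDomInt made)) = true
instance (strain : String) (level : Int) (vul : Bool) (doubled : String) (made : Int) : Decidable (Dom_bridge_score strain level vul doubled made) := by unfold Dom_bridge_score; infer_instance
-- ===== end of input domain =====

-- B replaces A's per-trick loop by a closed form over the contract-trick and overtrick counts (objective: faster).

-- ===== PORT A =====
def bridge_score (strain : String) (level : Int) (vul : Bool) (doubled : String) (made : Int) : Int :=
  let mul : Int := (PySem.Dict.ofList [("X", (2:Int)), ("XX", 4)]).getD doubled 1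
  let sb : Int × Int := (PySem.List.pyRange 1 (made+1) 1).foldl (fun (sb : Int × Int) trick =>
      let pts : Int :=
        if strain = "clubs" ∨ strain = "diamonds" then 20
        else if strain = "hearts" ∨ strain = "spades" then 30
        else if trick = 1 then 40 else 30
      if trick ≤ level then (sb.1 + mul * pts, sb.2)
      else if mul = 1 then (sb.1, sb.2 + mul * pts)
      else if mul = 2 then (sb.1, sb.2 + (if vul then 200 else 100))
      else (sb.1, sb.2 + (if vul then 400 else 200))) (0, 0)
  let score := sb.1
  let bonus := sb.2
  let bonus := bonus + (if score ≥ 100 then (if vul then 500 else 300) else 50)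
  let bonus := bonus + (if level = 6 then (if vul then 750 else 500) else 0)
  let bonus := bonus + (if level = 7 then (if vul then 1500 else 1000) else 0)
  let score := score + bonus
  if mul = 2 then score + 50 else if mul = 4 then score + 100 else score

-- ===== PORT B =====
def bridge_score_alt (strain : String) (level : Int) (vul : Bool) (doubled : String) (made : Int) : Int :=
  let mul : Int := if doubled = "X" then 2 else if doubled = "XX" then 4 else 1
  let c : Int := min made level
  let o : Int := made - c
  let tpov : Int × Int :=
    if strain = "clubs" ∨ strain = "diamonds" then (20 * c, 20 * o)
    else if strain = "hearts" ∨ strain = "spades" then (30 * c, 30 * o)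
    else ((if c ≠ 0 then 40 + 30 * (c - 1) else 0), 30 * o)
  let score := mul * tpov.1
  let bonus : Int :=
    if mul = 1 then tpov.2
    else if mul = 2 then (if vul then 200 else 100) * o
    else (if vul then 400 else 200) * o
  let bonus := bonus + (if score ≥ 100 then (if vul then 500 else 300) else 50)
  let bonus := bonus + (if level = 6 then (if vul then 750 else 500)
    else if level = 7 then (if vul then 1500 else 1000) else 0)
  let insult : Int := if mul = 2 then 50 else if mul = 4 then 100 else 0
  score + bonus + insult

-- ===== PRECONDITION & SPEC =====
-- Pre_ restricts to the natural domain of a bridge contract (a positive level and a nonnegative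
-- number of tricks made); outside it A still returns values, but they are accidents of its loop
-- (a 40-point first "overtrick" at notrump when level ≤ 0, a flat 50 for negative made) that no
-- scorer specifies.
def Pre_bridge_score (strain : String) (level : Int) (vul : Bool) (doubled : String) (made : Int) : Prop :=
  1 ≤ level ∧ 0 ≤ made
instance (strain : String) (level : Int) (vul : Bool) (doubled : String) (made : Int) : Decidable (Pre_bridge_score strain level vul doubled made) := by unfold Pre_bridge_score; infer_instance
def pvWitness_bridge_score : String × Int × Bool × String × Int := ("notrump", 3, false, "X", 4)

def Spec_bridge_score (strain : String) (level : Int) (vul : Bool) (doubled : String) (made : Int) (out : Int) : Prop := out = bridge_score_alt strain level vul doubled made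
instance (strain : String) (level : Int) (vul : Bool) (doubled : String) (made : Int) (out : Int) : Decidable (Spec_bridge_score strain level vul doubled made out) := by unfold Spec_bridge_score; infer_instance

-- ===== CLAIM (what is proved, stated in full; the proofs are below) =====
def Claim_equal_bridge_score : Prop := ∀ (strain : String) (level : Int) (vul : Bool) (doubled : String) (made : Int), Dom_bridge_score strain level vul doubled made → Pre_bridge_score strain level vul doubled made → Spec_bridge_score strain level vul doubled made (bridge_score strain level vul doubled made)

-- ===== LEMMAS AND PROOFS =====

-- Closed form of A's trick loop for level ≥ 1, with an abstract trick value v (+ d extra on trick 1).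
theorem pvLoop_closed (level : Int) (hl : 0 < level) (vul : Bool) (mul v d : Int) (n : Nat) :
    (PySem.List.pyRange 1 ((n:Int)+1) 1).foldl
      (fun (sb : Int × Int) t =>
        if t ≤ level then (sb.1 + mul * (v + if t = 1 then d else 0), sb.2)
        else if mul = 1 then (sb.1, sb.2 + mul * (v + if t = 1 then d else 0))
        else if mul = 2 then (sb.1, sb.2 + (if vul then 200 else 100))
        else (sb.1, sb.2 + (if vul then 400 else 200))) (0, 0) =
    ((mul * (v * min (n:Int) level + (if 0 < min (n:Int) level then d else 0))),
      if mul = 1 then v * ((n:Int) - min (n:Int) level)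
      else if mul = 2 then (if vul then 200 else 100) * ((n:Int) - min (n:Int) level)
      else (if vul then 400 else 200) * ((n:Int) - min (n:Int) level)) := by
  induction n with
  | zero =>
    rw [show ((0:Nat):Int) + 1 = 1 by norm_num, PySem.List.pyRange_one_eq_nil (by omega)]
    simp only [List.foldl_nil, Nat.cast_zero]
    have h0 : min (0:Int) level = 0 := by omega
    rw [h0]
    split_ifs <;> simp only [Prod.mk.injEq] <;> constructor <;> (first | ring1 | omega)
  | succ k ih =>
    rw [show (((k+1:Nat)):Int) + 1 = ((k:Int)+1) + 1 by push_cast; ring,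
        PySem.List.pyRange_one_succ_right (by omega), List.foldl_append, ih]
    simp only [List.foldl_cons, List.foldl_nil, Nat.cast_add, Nat.cast_one]
    by_cases ht : (k:Int) + 1 ≤ level
    · have h1 : min ((k:Int)+1) level = (k:Int) + 1 := by omega
      have h2 : min (k:Int) level = (k:Int) := by omega
      rw [h1, h2] at *
      simp only [if_pos ht]
      by_cases hk : (k:Int) + 1 = 1
      · have hk0 : (k:Int) = 0 := by omega
        rw [hk0] at *
        split_ifs <;> simp only [Prod.mk.injEq] <;> constructor <;> (first | ring1 | omega)
      · simp only [if_neg hk]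
        have hkpos : (0:Int) < (k:Int) := by omega
        split_ifs <;> simp only [Prod.mk.injEq] <;> constructor <;> (first | ring1 | omega)
    · have h1 : min ((k:Int)+1) level = level := by omega
      have h2 : min (k:Int) level = level := by omega
      have hk : ¬ ((k:Int) + 1 = 1) := by omega
      rw [h1, h2] at *
      simp only [if_neg ht, if_neg hk]
      split_ifs <;> simp only [Prod.mk.injEq] <;> constructor <;> (first | ring1 | omega | (exfalso; omega) | (simp_all; try ring1))

-- ===== VERDICT (by name: the statement is the Claim_ definition above) =====
set_option maxHeartbeats 1000000 in
theorem bridge_score_spec : Claim_equal_bridge_score := by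
  intro strain level vul doubled made _ hpre
  obtain ⟨hl1, hm⟩ := hpre
  simp only [Spec_bridge_score, bridge_score, bridge_score_alt]
  have hmul : (PySem.Dict.ofList [("X", (2:Int)), ("XX", 4)]).getD doubled 1
      = (if doubled = "X" then 2 else if doubled = "XX" then 4 else 1) := by
    by_cases h1 : doubled = "X"
    · subst h1; rfl
    by_cases h2 : doubled = "XX"
    · subst h2; rfl
    have hof : PySem.Dict.ofList [("X", (2:Int)), ("XX", 4)] = PySem.Dict.mk [("X", 2), ("XX", 4)] := by rfl
    have e1 : ("X" == doubled) = false := beq_eq_false_iff_ne.mpr (fun h => h1 h.symm)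
    have e2 : ("XX" == doubled) = false := beq_eq_false_iff_ne.mpr (fun h => h2 h.symm)
    rw [hof]
    simp [PySem.Dict.getD, PySem.Dict.get?, e1, e2, h1, h2]
  rw [hmul]
  generalize (if doubled = "X" then (2:Int) else if doubled = "XX" then 4 else 1) = mul
  obtain ⟨n, rfl⟩ : ∃ n : Nat, made = (n:Int) := ⟨made.toNat, (Int.toNat_of_nonneg hm).symm⟩
  by_cases hcd : strain = "clubs" ∨ strain = "diamonds"
  · rw [show (fun (sb : Int × Int) trick =>
      let pts : Int :=
        if strain = "clubs" ∨ strain = "diamonds" then 20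
        else if strain = "hearts" ∨ strain = "spades" then 30
        else if trick = 1 then 40 else 30
      if trick ≤ level then (sb.1 + mul * pts, sb.2)
      else if mul = 1 then (sb.1, sb.2 + mul * pts)
      else if mul = 2 then (sb.1, sb.2 + (if vul then 200 else 100))
      else (sb.1, sb.2 + (if vul then 400 else 200))) =
      (fun (sb : Int × Int) t =>
        if t ≤ level then (sb.1 + mul * ((20:Int) + if t = 1 then 0 else 0), sb.2)
        else if mul = 1 then (sb.1, sb.2 + mul * (20 + if t = 1 then 0 else 0))
        else if mul = 2 then (sb.1, sb.2 + (if vul then 200 else 100))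
        else (sb.1, sb.2 + (if vul then 400 else 200))) from funext fun sb => funext fun t => by
          simp [hcd], pvLoop_closed level (by omega)]
    simp only [hcd, if_true, ite_self, add_zero]
    split_ifs <;> omega
  · by_cases hhs : strain = "hearts" ∨ strain = "spades"
    · rw [show (fun (sb : Int × Int) trick =>
        let pts : Int :=
          if strain = "clubs" ∨ strain = "diamonds" then 20
          else if strain = "hearts" ∨ strain = "spades" then 30
          else if trick = 1 then 40 else 30
        if trick ≤ level then (sb.1 + mul * pts, sb.2)
        else if mul = 1 then (sb.1, sb.2 + mul * pts)
        else if mul = 2 then (sb.1, sb.2 + (if vul then 200 else 100))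
        else (sb.1, sb.2 + (if vul then 400 else 200))) =
        (fun (sb : Int × Int) t =>
          if t ≤ level then (sb.1 + mul * ((30:Int) + if t = 1 then 0 else 0), sb.2)
          else if mul = 1 then (sb.1, sb.2 + mul * (30 + if t = 1 then 0 else 0))
          else if mul = 2 then (sb.1, sb.2 + (if vul then 200 else 100))
          else (sb.1, sb.2 + (if vul then 400 else 200))) from funext fun sb => funext fun t => by
            simp [hcd, hhs], pvLoop_closed level (by omega)]
      simp only [hcd, hhs, if_true, if_false, ite_self, add_zero]
      split_ifs <;> omega
    · rw [show (fun (sb : Int × Int) trick =>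
        let pts : Int :=
          if strain = "clubs" ∨ strain = "diamonds" then 20
          else if strain = "hearts" ∨ strain = "spades" then 30
          else if trick = 1 then 40 else 30
        if trick ≤ level then (sb.1 + mul * pts, sb.2)
        else if mul = 1 then (sb.1, sb.2 + mul * pts)
        else if mul = 2 then (sb.1, sb.2 + (if vul then 200 else 100))
        else (sb.1, sb.2 + (if vul then 400 else 200))) =
        (fun (sb : Int × Int) t =>
          if t ≤ level then (sb.1 + mul * ((30:Int) + if t = 1 then 10 else 0), sb.2)
          else if mul = 1 then (sb.1, sb.2 + mul * (30 + if t = 1 then 10 else 0))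
          else if mul = 2 then (sb.1, sb.2 + (if vul then 200 else 100))
          else (sb.1, sb.2 + (if vul then 400 else 200))) from funext fun sb => funext fun t => by
            by_cases ht : t = 1 <;> simp [hcd, hhs, ht], pvLoop_closed level (by omega)]
      simp only [hcd, hhs, if_false]
      have hB : (if min ((n:Int)) level ≠ 0 then 40 + 30 * (min ((n:Int)) level - 1) else 0)
          = 30 * min ((n:Int)) level + (if 0 < min ((n:Int)) level then 10 else 0) := by
        split_ifs <;> omega
      rw [hB]
      split_ifs <;> omega
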